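-- pv_equiv track=rewrite | github.com/Nicoezg/TDA-Buchwald-2024-2C | Parciales/2024-c1-0.py | es_hitting_set
-- ===== SOURCE A (Python) =====
-- def es_hitting_set(A, subconjuntos, k, solucion):
--     # Si la solución tiene mas de k elementos, no es solucion
--     if len(solucion) > k:
--         return False
--
--     # Nos fijamos que el conjunto solucion tenga al menos un elemento
--     # de cada subconjunto
--     for conjunto in subconjuntos:
--         contiene_uno = False
--         for elemento in conjunto:
--             if elemento in solucion:
--                 contiene_uno = True
--         if not contiene_uno:
--             return False
--
--     # Nos fijamos que cada elemento de la solución exista en A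
--     for elemento in solucion:
--         if elemento not in A:
--             return False
--
--     return True
-- ===== SOURCE B (Python) =====
-- def es_hitting_set(A, subconjuntos, k, solucion):
--     if len(solucion) > k:
--         return False
--     cubiertos = set()
--     for elemento in solucion:
--         for i, conjunto in enumerate(subconjuntos):
--             if elemento in conjunto:
--                 cubiertos.add(i)
--     if len(cubiertos) != len(subconjuntos):
--         return False
--     return all(e in A for e in solucion)
-- ===== Notes on version B (the rewrite author's own statement) =====
-- stated objective: alternative
-- what changed: Replaces the per-subset inner scan with inverted loop nesting that maintains a set of covered subset indices (keyed by index via enumerate), deciding coverage by comparing the set's size to the number of subsets; the membership-in-A check becomes an all() comprehension.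
import Mathlib
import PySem

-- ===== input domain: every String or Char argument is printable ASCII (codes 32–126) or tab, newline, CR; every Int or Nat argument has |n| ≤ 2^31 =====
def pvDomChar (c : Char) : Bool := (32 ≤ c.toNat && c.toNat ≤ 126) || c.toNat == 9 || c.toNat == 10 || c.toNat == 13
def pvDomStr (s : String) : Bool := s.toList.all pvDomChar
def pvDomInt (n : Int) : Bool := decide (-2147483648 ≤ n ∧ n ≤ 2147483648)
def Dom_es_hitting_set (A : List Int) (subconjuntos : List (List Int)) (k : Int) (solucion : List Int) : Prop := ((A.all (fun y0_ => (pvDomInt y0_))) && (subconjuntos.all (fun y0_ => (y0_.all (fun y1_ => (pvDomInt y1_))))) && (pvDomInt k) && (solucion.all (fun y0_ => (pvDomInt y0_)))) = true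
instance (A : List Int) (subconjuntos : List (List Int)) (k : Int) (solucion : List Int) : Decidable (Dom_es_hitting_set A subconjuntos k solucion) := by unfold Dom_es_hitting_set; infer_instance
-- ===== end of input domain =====

-- B replaces A's per-subset scan by inverted loop nesting over a covered-index set; same cost, alternative decomposition.

-- ===== PORT A =====
-- the 'for conjunto in subconjuntos' loop with early return False
def pvCheckSubsA (solucion : List Int) : List (List Int) → Bool
  | [] => true
  | c :: rest =>
    let contiene_uno := c.foldl (fun acc e => if solucion.contains e then true else acc) false
    if !contiene_uno then false else pvCheckSubsA solucion rest

-- the 'for elemento in solucion' loop with early return False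
def pvCheckSolA (A : List Int) : List Int → Bool
  | [] => true
  | e :: rest => if !(A.contains e) then false else pvCheckSolA A rest

def es_hitting_set (A : List Int) (subconjuntos : List (List Int)) (k : Int) (solucion : List Int) : Bool :=
  if (solucion.length : Int) > k then false
  else if pvCheckSubsA solucion subconjuntos then pvCheckSolA A solucion
  else false

-- ===== PORT B =====
-- the two nested loops building the covered-index set 'cubiertos'
def pvCubiertosB (subconjuntos : List (List Int)) (solucion : List Int) : PySem.Set Int :=
  solucion.foldl (fun s elemento =>
      (PySem.List.enumerate subconjuntos).foldl
        (fun s2 p => if p.2.contains elemento then PySem.Set.add s2 p.1 else s2) s)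
    (PySem.Set.empty : PySem.Set Int)

def es_hitting_set_alt (A : List Int) (subconjuntos : List (List Int)) (k : Int) (solucion : List Int) : Bool :=
  if (solucion.length : Int) > k then false
  else if (pvCubiertosB subconjuntos solucion).length ≠ subconjuntos.length then false
  else solucion.all (fun e => A.contains e)

-- ===== PRECONDITION & SPEC =====
def Spec_es_hitting_set (A : List Int) (subconjuntos : List (List Int)) (k : Int) (solucion : List Int) (out : Bool) : Prop := out = es_hitting_set_alt A subconjuntos k solucion
instance (A : List Int) (subconjuntos : List (List Int)) (k : Int) (solucion : List Int) (out : Bool) : Decidable (Spec_es_hitting_set A subconjuntos k solucion out) := by unfold Spec_es_hitting_set; infer_instance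

-- ===== CLAIM (what is proved, stated in full; the proofs are below) =====
def Claim_equal_es_hitting_set : Prop := ∀ (A : List Int) (subconjuntos : List (List Int)) (k : Int) (solucion : List Int), Dom_es_hitting_set A subconjuntos k solucion → Spec_es_hitting_set A subconjuntos k solucion (es_hitting_set A subconjuntos k solucion)

-- ===== LEMMAS AND PROOFS =====

theorem pv_fold_or (sol : List Int) (c : List Int) (acc : Bool) :
    c.foldl (fun acc e => if sol.contains e then true else acc) acc
      = (acc || c.any (fun e => sol.contains e)) := by
  induction c generalizing acc with
  | nil => simp
  | cons x xs ih =>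
    simp only [List.foldl_cons, List.any_cons, ih]
    by_cases h : x ∈ sol <;>
      simp [h]

theorem pv_checkSubsA_iff (sol : List Int) (subs : List (List Int)) :
    pvCheckSubsA sol subs = true ↔ ∀ c ∈ subs, ∃ e ∈ c, e ∈ sol := by
  induction subs with
  | nil => simp [pvCheckSubsA]
  | cons c rest ih =>
    by_cases h : ∃ e ∈ c, e ∈ sol
    · have hc : c.any (fun e => sol.contains e) = true := by
        obtain ⟨e, he, hs⟩ := h
        exact List.any_eq_true.mpr ⟨e, he, by simpa using hs⟩
      simp only [pvCheckSubsA, pv_fold_or, Bool.false_or, hc, Bool.not_true, Bool.false_eq_true,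
        if_false, ih]
      constructor
      · intro hr d hd
        rcases List.mem_cons.mp hd with rfl | hd'
        · exact h
        · exact hr d hd'
      · intro hr d hd
        exact hr d (List.mem_cons_of_mem _ hd)
    · have hc : c.any (fun e => sol.contains e) = false := by
        simp only [List.any_eq_false]
        intro e he
        simpa using fun hs => h ⟨e, he, hs⟩
      simp only [pvCheckSubsA, pv_fold_or, Bool.false_or, hc, Bool.not_false, if_true]
      constructor
      · intro hf; exact absurd hf (by simp)
      · intro hr; exact absurd (hr c (by simp)) h

theorem pv_checkSolA_eq (A : List Int) (sol : List Int) :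
    pvCheckSolA A sol = sol.all (fun e => A.contains e) := by
  induction sol with
  | nil => simp [pvCheckSolA]
  | cons e rest ih =>
    simp only [pvCheckSolA, List.all_cons, ih]
    by_cases h : A.contains e = true <;> simp only [h, Bool.not_true, Bool.not_false,
      Bool.false_eq_true, if_false, if_true, Bool.true_and, Bool.false_and]

-- membership in the inner fold over enumerate
theorem pv_mem_inner (enum : List (Int × List Int)) (e : Int) (s : PySem.Set Int) (i : Int) :
    (i ∈ enum.foldl (fun s2 p => if p.2.contains e then PySem.Set.add s2 p.1 else s2) s)
      ↔ i ∈ s ∨ ∃ p ∈ enum, p.1 = i ∧ e ∈ p.2 := by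
  induction enum generalizing s with
  | nil => simp
  | cons p rest ih =>
    simp only [List.foldl_cons, List.mem_cons]
    by_cases h : p.2.contains e = true
    · simp only [h, if_true, ih, PySem.Set.mem_add]
      constructor
      · rintro ((hs | rfl) | ⟨q, hq, rfl, hq2⟩)
        · exact Or.inl hs
        · exact Or.inr ⟨p, Or.inl rfl, rfl, by simpa using h⟩
        · exact Or.inr ⟨q, Or.inr hq, rfl, hq2⟩
      · rintro (hs | ⟨q, (rfl | hq), rfl, hq2⟩)
        · exact Or.inl (Or.inl hs)
        · exact Or.inl (Or.inr rfl)
        · exact Or.inr ⟨q, hq, rfl, hq2⟩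
    · simp only [h, ih]
      constructor
      · rintro (hs | ⟨q, hq, rfl, hq2⟩)
        · exact Or.inl hs
        · exact Or.inr ⟨q, Or.inr hq, rfl, hq2⟩
      · rintro (hs | ⟨q, (rfl | hq), rfl, hq2⟩)
        · exact Or.inl hs
        · exact absurd hq2 (by simpa using h)
        · exact Or.inr ⟨q, hq, rfl, hq2⟩

theorem pv_nodup_inner (enum : List (Int × List Int)) (e : Int) (s : PySem.Set Int)
    (hs : s.Nodup) :
    (enum.foldl (fun s2 p => if p.2.contains e then PySem.Set.add s2 p.1 else s2) s).Nodup := by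
  induction enum generalizing s with
  | nil => exact hs
  | cons p rest ih =>
    simp only [List.foldl_cons]
    by_cases h : p.2.contains e = true
    · simp only [h, if_true]; exact ih _ (PySem.Set.nodup_add s p.1 hs)
    · simp only [h]; exact ih _ hs

theorem pv_nodup_cub (subs : List (List Int)) (sol : List Int) :
    (pvCubiertosB subs sol).Nodup := by
  unfold pvCubiertosB
  generalize hS : (PySem.Set.empty : PySem.Set Int) = s
  have hs : s.Nodup := by rw [← hS]; simp [PySem.Set.empty]
  clear hS
  induction sol generalizing s with
  | nil => exact hs
  | cons e rest ih => exact ih _ (pv_nodup_inner _ _ _ hs)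

theorem pv_mem_outer (sol : List Int) (subs : List (List Int)) (s : PySem.Set Int) (i : Int) :
    (i ∈ sol.foldl (fun s elemento =>
        (PySem.List.enumerate subs).foldl
          (fun s2 p => if p.2.contains elemento then PySem.Set.add s2 p.1 else s2) s) s)
      ↔ i ∈ s ∨ ∃ e ∈ sol, ∃ p ∈ PySem.List.enumerate subs, p.1 = i ∧ e ∈ p.2 := by
  induction sol generalizing s with
  | nil => simp
  | cons e rest ih =>
    simp only [List.foldl_cons, ih, pv_mem_inner, List.mem_cons]
    constructor
    · rintro ((hs | ⟨p, hp, rfl, hp2⟩) | ⟨e', he', hrest⟩)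
      · exact Or.inl hs
      · exact Or.inr ⟨e, Or.inl rfl, p, hp, rfl, hp2⟩
      · exact Or.inr ⟨e', Or.inr he', hrest⟩
    · rintro (hs | ⟨e', (rfl | he'), hrest⟩)
      · exact Or.inl (Or.inl hs)
      · exact Or.inl (Or.inr hrest)
      · exact Or.inr ⟨e', he', hrest⟩

-- the covered-index set characterisation
theorem pv_mem_cub (subs : List (List Int)) (sol : List Int) (i : Int) :
    i ∈ pvCubiertosB subs sol
      ↔ ∃ m : Nat, ∃ _ : m < subs.length, i = (m : Int) ∧ ∃ e ∈ sol, e ∈ subs[m] := by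
  unfold pvCubiertosB
  rw [pv_mem_outer]
  simp only [PySem.Set.empty, List.not_mem_nil, false_or, PySem.List.mem_enumerate_iff]
  constructor
  · rintro ⟨e, he, p, ⟨m, hm, rfl⟩, h1, h2⟩
    exact ⟨m, hm, by simpa using h1.symm, e, he, by simpa using h2⟩
  · rintro ⟨m, hm, rfl, e, he, hmem⟩
    exact ⟨e, he, ((0 : Int) + m, subs[m]), ⟨m, hm, rfl⟩, by simp, hmem⟩

theorem pv_len_cub_iff (subs : List (List Int)) (sol : List Int) :
    (pvCubiertosB subs sol).length = subs.length
      ↔ ∀ m : Nat, (h : m < subs.length) → ∃ e ∈ sol, e ∈ subs[m] := by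
  have hnd : (pvCubiertosB subs sol).Nodup := pv_nodup_cub subs sol
  have hSnd : ((List.range subs.length).map (fun m : Nat => (m : Int))).Nodup :=
    List.Nodup.map (fun a b h => by exact_mod_cast h) List.nodup_range
  have hSlen : ((List.range subs.length).map (fun m : Nat => (m : Int))).length = subs.length := by
    simp
  have hmemS : ∀ i : Int, i ∈ (List.range subs.length).map (fun m : Nat => (m : Int))
      ↔ ∃ m : Nat, m < subs.length ∧ i = (m : Int) := by
    intro i
    simp only [List.mem_map, List.mem_range]
    constructor
    · rintro ⟨m, hm, rfl⟩; exact ⟨m, hm, rfl⟩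
    · rintro ⟨m, hm, rfl⟩; exact ⟨m, hm, rfl⟩
  have hsub : pvCubiertosB subs sol ⊆ (List.range subs.length).map (fun m : Nat => (m : Int)) := by
    intro i hi
    rw [pv_mem_cub] at hi
    obtain ⟨m, hm, rfl, _⟩ := hi
    exact (hmemS _).mpr ⟨m, hm, rfl⟩
  constructor
  · intro hlen m hm
    have hperm : (pvCubiertosB subs sol).Perm ((List.range subs.length).map (fun m : Nat => (m : Int))) :=
      (List.subperm_of_subset hnd hsub).perm_of_length_le (by omega)
    have hmi : ((m : Int)) ∈ pvCubiertosB subs sol :=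
      hperm.mem_iff.mpr ((hmemS _).mpr ⟨m, hm, rfl⟩)
    rw [pv_mem_cub] at hmi
    obtain ⟨m', _, heq, e, he, hmem⟩ := hmi
    have hmm : m' = m := by exact_mod_cast heq.symm
    subst hmm
    exact ⟨e, he, hmem⟩
  · intro hcov
    have hsub2 : (List.range subs.length).map (fun m : Nat => (m : Int)) ⊆ pvCubiertosB subs sol := by
      intro i hi
      obtain ⟨m, hm, rfl⟩ := (hmemS _).mp hi
      exact (pv_mem_cub _ _ _).mpr ⟨m, hm, rfl, hcov m hm⟩
    have h1 := (List.subperm_of_subset hnd hsub).length_le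
    have h2 := (List.subperm_of_subset hSnd hsub2).length_le
    omega

theorem pv_hiff (subs : List (List Int)) (sol : List Int) :
    pvCheckSubsA sol subs = true ↔ (pvCubiertosB subs sol).length = subs.length := by
  rw [pv_checkSubsA_iff, pv_len_cub_iff]
  constructor
  · intro h m hm
    obtain ⟨e, he, hes⟩ := h subs[m] (List.getElem_mem hm)
    exact ⟨e, hes, he⟩
  · intro h c hc
    obtain ⟨m, hm, rfl⟩ := List.getElem_of_mem hc
    obtain ⟨e, he, hes⟩ := h m hm
    exact ⟨e, hes, he⟩

-- ===== VERDICT (by name: the statement is the Claim_ definition above) =====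
theorem es_hitting_set_spec : Claim_equal_es_hitting_set := by
  intro A subs k sol _
  unfold Spec_es_hitting_set es_hitting_set es_hitting_set_alt
  by_cases hk : (sol.length : Int) > k
  · rw [if_pos hk, if_pos hk]
  · rw [if_neg hk, if_neg hk]
    by_cases hA : pvCheckSubsA sol subs = true
    · rw [if_pos hA, if_neg (not_not_intro ((pv_hiff subs sol).mp hA))]
      exact pv_checkSolA_eq A sol
    · rw [if_neg hA, if_pos (fun h => hA ((pv_hiff subs sol).mpr h))]
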